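-- pv_equiv track=rewrite | github.com/YashB63/GFG-Daily-Questions | Day 272/Modify the Array/modify_the_array.py | modifyAndRearrangeArr
-- ===== SOURCE A (Python) =====
-- def modifyAndRearrangeArr (arr) :
--     last_non_zero_index=0
--     for i in range(len(arr)):
--         if arr[i]!=0:
--             if i+1<len(arr) and arr[i]==arr[i+1]:
--                 arr[i]=arr[i]*2
--                 arr[i+1]=0
--             arr[last_non_zero_index], arr[i] = arr[i], arr[last_non_zero_index]
--             last_non_zero_index += 1
--
--     return arr
-- ===== SOURCE B (Python) =====
-- def modifyAndRearrangeArr(arr):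
--     # Phase 1: merge adjacent equal nonzeros (double left, zero right)
--     for i in range(len(arr) - 1):
--         if arr[i] != 0 and arr[i] == arr[i + 1]:
--             arr[i] *= 2
--             arr[i + 1] = 0
--     # Phase 2: compact nonzeros to the front, pad with zeros (in place)
--     res = [x for x in arr if x != 0]
--     arr[:] = res + [0] * (len(arr) - len(res))
--     return arr
-- ===== Notes on version B (the rewrite author's own statement) =====
-- stated objective: simpler
-- what changed: A's single fused loop (merge + swap-compaction with a last_non_zero_index pointer) is split into two plain passes: a standalone adjacent-merge pass, then compaction by filtering nonzeros and padding with zeros, written back in place.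
import Mathlib
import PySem

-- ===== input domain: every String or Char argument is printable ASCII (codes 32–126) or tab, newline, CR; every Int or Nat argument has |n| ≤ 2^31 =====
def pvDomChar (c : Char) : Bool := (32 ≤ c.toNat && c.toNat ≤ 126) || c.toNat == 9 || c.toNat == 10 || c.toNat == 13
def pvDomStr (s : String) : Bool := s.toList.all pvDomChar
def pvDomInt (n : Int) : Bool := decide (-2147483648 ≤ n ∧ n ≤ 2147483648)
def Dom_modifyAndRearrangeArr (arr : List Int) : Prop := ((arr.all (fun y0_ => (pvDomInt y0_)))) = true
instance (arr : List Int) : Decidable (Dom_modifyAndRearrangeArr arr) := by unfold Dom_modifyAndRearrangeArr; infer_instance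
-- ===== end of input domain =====

-- B replaces A's fused merge+swap-compaction loop by two plain passes (merge, then
-- filter-nonzeros-and-pad compaction); objective: simpler. Both Pythons mutate arr in
-- place; the equivalence proved here is about the RETURN value (which is that list).

-- ===== PORT A =====
-- One loop step of A: i (and the guarded i+1) and last_non_zero_index are always in
-- range when reached, so `getD _ 0` is exact for Python's arr[_] here.
def stepA (s : List Int × Nat) (i : Nat) : List Int × Nat :=
  if s.1.getD i 0 ≠ 0 then
    -- if i+1<len(arr) and arr[i]==arr[i+1]: arr[i]=arr[i]*2; arr[i+1]=0
    let a := if i + 1 < s.1.length ∧ s.1.getD i 0 = s.1.getD (i + 1) 0 then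
        (s.1.set i (s.1.getD i 0 * 2)).set (i + 1) 0
      else s.1
    -- arr[last_non_zero_index], arr[i] = arr[i], arr[last_non_zero_index]
    ((a.set s.2 (a.getD i 0)).set i (a.getD s.2 0), s.2 + 1)
  else s

def modifyAndRearrangeArr (arr : List Int) : List Int :=
  ((List.range arr.length).foldl stepA (arr, 0)).1

-- ===== PORT B =====
-- Phase 1 step: if arr[i]!=0 and arr[i]==arr[i+1]: arr[i]*=2; arr[i+1]=0
-- (i and i+1 are in range for i in range(len(arr)-1); `getD _ 0` is exact).
def mergeStep (a : List Int) (i : Nat) : List Int :=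
  if a.getD i 0 ≠ 0 ∧ a.getD i 0 = a.getD (i + 1) 0 then
    (a.set i (a.getD i 0 * 2)).set (i + 1) 0
  else a

def modifyAndRearrangeArr_alt (arr : List Int) : List Int :=
  let m := (List.range (arr.length - 1)).foldl mergeStep arr
  let res := m.filter (fun x => x != 0)
  res ++ List.replicate (m.length - res.length) 0

-- ===== PRECONDITION & SPEC =====
def Spec_modifyAndRearrangeArr (arr : List Int) (out : List Int) : Prop := out = modifyAndRearrangeArr_alt arr
instance (arr : List Int) (out : List Int) : Decidable (Spec_modifyAndRearrangeArr arr out) := by unfold Spec_modifyAndRearrangeArr; infer_instance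

-- ===== CLAIM (what is proved, stated in full; the proofs are below) =====
def Claim_equal_modifyAndRearrangeArr : Prop := ∀ (arr : List Int), Dom_modifyAndRearrangeArr arr → Spec_modifyAndRearrangeArr arr (modifyAndRearrangeArr arr)

-- ===== LEMMAS AND PROOFS =====

theorem pv_getD_at : ∀ (T : List Int) (x : Int) (r : List Int), (T ++ x :: r).getD T.length 0 = x := by
  intro T; induction T with
  | nil => intro x r; rfl
  | cons t T ih => intro x r; simpa using ih x r
theorem pv_getD_at1 : ∀ (T : List Int) (x : Int) (r : List Int),
    (T ++ x :: r).getD (T.length + 1) 0 = r.getD 0 0 := by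
  intro T; induction T with
  | nil => intro x r; cases r <;> rfl
  | cons t T ih => intro x r; simpa using ih x r
theorem pv_set_at : ∀ (T : List Int) (x v : Int) (r : List Int),
    (T ++ x :: r).set T.length v = T ++ v :: r := by
  intro T; induction T with
  | nil => intro x v r; rfl
  | cons t T ih => intro x v r; simpa [List.set] using ih x v r
theorem pv_set_at1 : ∀ (T : List Int) (x v : Int) (r : List Int),
    (T ++ x :: r).set (T.length + 1) v = T ++ x :: r.set 0 v := by
  intro T; induction T with
  | nil => intro x v r; rfl
  | cons t T ih => intro x v r; simpa [List.set] using ih x v r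
theorem pv_rep (w : Nat) (l : List Int) :
    List.replicate w (0 : Int) ++ 0 :: l = 0 :: (List.replicate w 0 ++ l) := by
  induction w with
  | zero => rfl
  | succ w ih => simpa [List.replicate_succ] using ih

theorem stepA_merge (F : List Int) (z : Nat) (x : Int) (r' : List Int) (hx : x ≠ 0) :
    stepA (F ++ (List.replicate z 0 ++ x :: x :: r'), F.length) (F.length + z) =
      (F ++ x * 2 :: (List.replicate z 0 ++ 0 :: r'), F.length + 1) := by
  have hT : (F ++ List.replicate z (0 : Int)).length = F.length + z := by simp
  have e0 : F ++ (List.replicate z (0:Int) ++ x :: x :: r') = (F ++ List.replicate z 0) ++ x :: x :: r' := by simp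
  have hg : ((F ++ List.replicate z (0:Int)) ++ x :: x :: r').getD (F.length + z) 0 = x := by
    rw [← hT, pv_getD_at]
  have hg1 : ((F ++ List.replicate z (0:Int)) ++ x :: x :: r').getD (F.length + z + 1) 0 = x := by
    rw [← hT, pv_getD_at1]; rfl
  have hlt : F.length + z + 1 < ((F ++ List.replicate z (0:Int)) ++ x :: x :: r').length := by
    simp; omega
  have hset : ((((F ++ List.replicate z (0:Int)) ++ x :: x :: r').set (F.length + z) (x*2)).set (F.length + z + 1) 0)
      = (F ++ List.replicate z 0) ++ x * 2 :: 0 :: r' := by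
    rw [← hT, pv_set_at, pv_set_at1]; rfl
  rw [e0]
  simp only [stepA, hg, hg1, hlt, hx, ne_eq, not_false_iff, if_pos, and_self, hset]
  have hgi : ((F ++ List.replicate z (0:Int)) ++ x * 2 :: 0 :: r').getD (F.length + z) 0 = x * 2 := by
    rw [← hT, pv_getD_at]
  rw [show F ++ List.replicate z (0:Int) ++ x * 2 :: 0 :: r' = (F ++ List.replicate z 0) ++ x * 2 :: 0 :: r' from by simp] at *
  rw [hgi]
  cases z with
  | zero =>
      simp only [List.replicate, List.append_nil] at *
      rw [pv_getD_at, pv_set_at, Nat.add_zero, pv_set_at]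
      simp
  | succ w =>
      have ea : (F ++ List.replicate (w+1) (0:Int)) ++ x * 2 :: 0 :: r' = F ++ 0 :: (List.replicate w 0 ++ x * 2 :: 0 :: r') := by
        simp [List.replicate_succ]
      rw [ea, pv_getD_at, pv_set_at]
      have eb : F ++ x * 2 :: (List.replicate w (0:Int) ++ x * 2 :: 0 :: r') = (F ++ x * 2 :: List.replicate w 0) ++ x * 2 :: 0 :: r' := by
        simp
      have hT2 : F.length + (w+1) = (F ++ x * 2 :: List.replicate w (0:Int)).length := by
        simp
      rw [eb, hT2, pv_set_at]
      simp [List.replicate_succ, pv_rep]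

theorem stepA_nomerge (F : List Int) (z : Nat) (x : Int) (r : List Int) (hx : x ≠ 0)
    (hnm : x ≠ r.getD 0 0) :
    stepA (F ++ (List.replicate z 0 ++ x :: r), F.length) (F.length + z) =
      (F ++ x :: (List.replicate z 0 ++ r), F.length + 1) := by
  have hT : (F ++ List.replicate z (0 : Int)).length = F.length + z := by simp
  have e0 : F ++ (List.replicate z (0:Int) ++ x :: r) = (F ++ List.replicate z 0) ++ x :: r := by simp
  have hg : ((F ++ List.replicate z (0:Int)) ++ x :: r).getD (F.length + z) 0 = x := by
    rw [← hT, pv_getD_at]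
  have hg1 : ((F ++ List.replicate z (0:Int)) ++ x :: r).getD (F.length + z + 1) 0 = r.getD 0 0 := by
    rw [← hT, pv_getD_at1]
  rw [e0]
  simp only [stepA, hg, hg1, hx, ne_eq, not_false_iff, if_pos]
  rw [if_neg (by rintro ⟨-, h⟩; exact hnm h)]
  cases z with
  | zero =>
      simp only [List.replicate, List.append_nil] at *
      rw [pv_getD_at, pv_set_at, Nat.add_zero, pv_set_at]
      simp
  | succ w =>
      have ea : (F ++ List.replicate (w+1) (0:Int)) ++ x :: r = F ++ 0 :: (List.replicate w 0 ++ x :: r) := by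
        simp [List.replicate_succ]
      rw [ea, pv_getD_at, pv_set_at]
      rw [show (F ++ 0 :: (List.replicate w (0:Int) ++ x :: r)).getD (F.length + (w+1)) 0 = x from by rw [← ea]; exact hg]
      have eb : F ++ x :: (List.replicate w (0:Int) ++ x :: r) = (F ++ x :: List.replicate w 0) ++ x :: r := by
        simp
      have hT2 : F.length + (w+1) = (F ++ x :: List.replicate w (0:Int)).length := by
        simp
      rw [eb, hT2, pv_set_at]
      simp [List.replicate_succ, pv_rep]

def afold (arr : List Int) (i : Nat) : List Int × Nat := (List.range i).foldl stepA (arr, 0)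
def mfold (arr : List Int) (i : Nat) : List Int := (List.range i).foldl mergeStep arr
theorem afold_succ (arr : List Int) (i : Nat) : afold arr (i + 1) = stepA (afold arr i) i := by
  simp [afold, List.range_succ]
theorem mfold_succ (arr : List Int) (i : Nat) : mfold arr (i + 1) = mergeStep (mfold arr i) i := by
  simp [mfold, List.range_succ]
theorem mergeStep_length (a : List Int) (i : Nat) : (mergeStep a i).length = a.length := by
  unfold mergeStep; split <;> simp
theorem mfold_length (arr : List Int) (i : Nat) : (mfold arr i).length = arr.length := by
  induction i with
  | zero => rfl
  | succ i ih => rw [mfold_succ, mergeStep_length, ih]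
theorem mergeStep_merge (P : List Int) (x : Int) (r' : List Int) (hx : x ≠ 0) :
    mergeStep (P ++ x :: x :: r') P.length = P ++ x * 2 :: 0 :: r' := by
  have hg : (P ++ x :: x :: r').getD P.length 0 = x := pv_getD_at P x (x :: r')
  have hg1 : (P ++ x :: x :: r').getD (P.length + 1) 0 = x := by
    rw [pv_getD_at1]; rfl
  unfold mergeStep
  rw [if_pos ⟨by rw [hg]; exact hx, by rw [hg, hg1]⟩, hg, pv_set_at, pv_set_at1]
  rfl
theorem mergeStep_skip (P : List Int) (x : Int) (r : List Int) (h : x = 0 ∨ x ≠ r.getD 0 0) :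
    mergeStep (P ++ x :: r) P.length = P ++ x :: r := by
  have hg : (P ++ x :: r).getD P.length 0 = x := pv_getD_at P x r
  have hg1 : (P ++ x :: r).getD (P.length + 1) 0 = r.getD 0 0 := pv_getD_at1 P x r
  unfold mergeStep
  rw [if_neg]
  rintro ⟨h1, h2⟩
  rw [hg] at h1 h2
  rw [hg1] at h2
  rcases h with h | h
  · exact h1 h
  · exact h h2
theorem stepA_zero (F : List Int) (z : Nat) (r : List Int) (k : Nat) :
    stepA (F ++ (List.replicate z 0 ++ 0 :: r), k) (F.length + z) =
      (F ++ (List.replicate z 0 ++ 0 :: r), k) := by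
  simp [stepA]

theorem mergeStep_skip' (P : List Int) (x : Int) (r : List Int) (n : Nat) (hn : n = P.length)
    (h : x = 0 ∨ x ≠ r.getD 0 0) : mergeStep (P ++ x :: r) n = P ++ x :: r := by
  rw [hn]; exact mergeStep_skip P x r h
theorem mergeStep_merge' (P : List Int) (x : Int) (r' : List Int) (n : Nat) (hn : n = P.length)
    (hx : x ≠ 0) : mergeStep (P ++ x :: x :: r') n = P ++ x * 2 :: 0 :: r' := by
  rw [hn]; exact mergeStep_merge P x r' hx

theorem pv_inv (arr : List Int) : ∀ i, i ≤ arr.length →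
    ∃ P rest, mfold arr i = P ++ rest ∧ P.length = i ∧
      afold arr i = (P.filter (fun x => x != 0) ++
          (List.replicate (i - (P.filter (fun x => x != 0)).length) 0 ++ rest),
        (P.filter (fun x => x != 0)).length) := by
  intro i
  induction i with
  | zero => exact fun _ => ⟨[], arr, rfl, rfl, by simp [afold]⟩
  | succ i ih =>
    intro hle
    obtain ⟨P, rest, hm, hP, ha⟩ := ih (Nat.le_of_succ_le hle)
    have hlen := mfold_length arr i
    rw [hm] at hlen
    obtain ⟨x, r, rfl⟩ : ∃ x r, rest = x :: r := by
      cases rest with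
      | nil => exfalso; simp at hlen; omega
      | cons x r => exact ⟨x, r, rfl⟩
    have hFle : (P.filter (fun x => x != 0)).length ≤ i := by
      calc (P.filter (fun x => x != 0)).length ≤ P.length := List.length_filter_le _ _
        _ = i := hP
    obtain ⟨z, hz⟩ : ∃ z, i = (P.filter (fun x => x != 0)).length + z :=
      ⟨i - (P.filter (fun x => x != 0)).length, (Nat.add_sub_cancel' hFle).symm⟩
    subst hz
    rw [mfold_succ, hm, afold_succ, ha, Nat.add_sub_cancel_left]
    by_cases hx : x = 0
    · subst hx
      rw [mergeStep_skip' P 0 r _ hP.symm (Or.inl rfl), stepA_zero]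
      refine ⟨P ++ [0], r, by simp, by simp [hP], ?_⟩
      simp [List.filter_append, pv_rep]
      rw [show (List.filter (fun x => x != 0) P).length + z + 1 - (List.filter (fun x => x != 0) P).length = z + 1 from by omega]
      simp [List.replicate_succ]
    · cases r with
      | nil =>
        rw [mergeStep_skip' P x [] _ hP.symm (Or.inr (by simpa using hx)),
          stepA_nomerge _ _ _ _ hx (by simpa using hx)]
        refine ⟨P ++ [x], [], by simp, by simp [hP], ?_⟩
        simp [List.filter_append, hx]
      | cons y r' =>
        by_cases hxy : x = y
        · subst hxy
          rw [mergeStep_merge' P x r' _ hP.symm hx, stepA_merge _ _ _ _ hx]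
          have h2 : x * 2 ≠ 0 := by omega
          refine ⟨P ++ [x * 2], 0 :: r', by simp, by simp [hP], ?_⟩
          simp [List.filter_append, h2]
        · rw [mergeStep_skip' P x (y :: r') _ hP.symm (Or.inr (by simpa using hxy)),
            stepA_nomerge _ _ _ _ hx (by simpa using hxy)]
          refine ⟨P ++ [x], y :: r', by simp, by simp [hP], ?_⟩
          simp [List.filter_append, hx]

theorem pv_getD_oob : ∀ (l : List Int) (n : Nat), l.length ≤ n → l.getD n 0 = 0 := by
  intro l
  induction l with
  | nil => intro n _; cases n <;> rfl
  | cons a l ih =>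
    intro n h
    cases n with
    | zero => exact absurd h (by simp)
    | succ n => simpa using ih n (by simpa using h)

theorem mergeStep_oob (a : List Int) (i : Nat) (h : a.length ≤ i + 1) : mergeStep a i = a := by
  unfold mergeStep
  rw [if_neg]
  rintro ⟨h1, h2⟩
  rw [pv_getD_oob _ _ h] at h2
  exact h1 h2

theorem mfold_last (arr : List Int) : mfold arr arr.length = mfold arr (arr.length - 1) := by
  cases h : arr.length with
  | zero => rfl
  | succ n =>
    show mfold arr (n + 1) = mfold arr n
    rw [mfold_succ]
    exact mergeStep_oob _ _ (by rw [mfold_length]; omega)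

theorem pv_final (arr : List Int) : modifyAndRearrangeArr arr = modifyAndRearrangeArr_alt arr := by
  obtain ⟨P, rest, hm, hP, ha⟩ := pv_inv arr arr.length (Nat.le_refl _)
  have hrest : rest = [] := by
    have hl := mfold_length arr arr.length
    rw [hm] at hl
    simp at hl
    cases rest with
    | nil => rfl
    | cons a t => exfalso; simp at hl; omega
  subst hrest
  have halt : modifyAndRearrangeArr_alt arr =
      (mfold arr (arr.length - 1)).filter (fun x => x != 0) ++
        List.replicate ((mfold arr (arr.length - 1)).length -
          ((mfold arr (arr.length - 1)).filter (fun x => x != 0)).length) 0 := rfl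
  have hA : modifyAndRearrangeArr arr = (afold arr arr.length).1 := rfl
  rw [hA, ha, halt, ← mfold_last, hm]
  simp
  rw [hP]

-- ===== VERDICT (by name: the statement is the Claim_ definition above) =====
theorem modifyAndRearrangeArr_spec : Claim_equal_modifyAndRearrangeArr := by
  intro arr _
  unfold Spec_modifyAndRearrangeArr
  exact pv_final arr
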